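-- pv_equiv track=rewrite | github.com/l1mey112/logical-transformer | old/tt.py | iter_to_identifers
-- ===== SOURCE A (Python) =====
-- def iter_to_identifers(src: str):
-- 	# return iterator, yielding (bool, int, int)
--
-- 	start = 0
-- 	i = 0
-- 	strch = None
--
-- 	while True:
-- 		if i >= len(src):
-- 			yield (True, start, len(src)) # valid searchable text
-- 			return
--
-- 		ch = src[i]
--
-- 		if ch.isspace():
-- 			pass
-- 		elif strch is None:
-- 			if ch == "'" or ch == '"':
-- 				strch = ch
-- 				yield (True, start, i) # valid searchable text
-- 				start = i
-- 			elif ch == "#":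
-- 				if src[start:i] != '':
-- 					yield (True, start, i) # valid searchable text
-- 				yield (False, i, len(src)) # invalid searchable text
-- 				return
-- 		else:
-- 			if ch == "\\":
-- 				i += 1
-- 			elif ch == strch:
-- 				strch = None
-- 				yield (False, start, i + 1) # invalid searchable text
-- 				start = i + 1
-- 		i += 1
-- ===== SOURCE B (Python) =====
-- def iter_to_identifers(src: str):
-- 	# Nested-loop decomposition: the outer loop walks searchable text; a
-- 	# dedicated inner loop consumes one string literal to its closing quote.
-- 	n = len(src)
-- 	start = 0
-- 	i = 0
-- 	while i < n:
-- 		ch = src[i]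
-- 		if ch == "'" or ch == '"':
-- 			yield (True, start, i)
-- 			j = i + 1
-- 			while j < n:
-- 				c = src[j]
-- 				if c == "\\":
-- 					j += 2
-- 				elif c == ch:
-- 					yield (False, i, j + 1)
-- 					break
-- 				else:
-- 					j += 1
-- 			else:
-- 				yield (True, i, n)
-- 				return
-- 			start = j + 1
-- 			i = j + 1
-- 		elif ch == "#":
-- 			if start != i:
-- 				yield (True, start, i)
-- 			yield (False, i, n)
-- 			return
-- 		else:
-- 			i += 1
-- 	yield (True, start, n)
-- ===== Notes on version B (the rewrite author's own statement) =====
-- stated objective: alternative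
-- what changed: Replaced A's flat single while-loop state machine with a strch flag by a nested-loop decomposition: an outer loop over searchable text and a dedicated inner loop that consumes one string literal to its closing quote, with the comment emptiness guard as an index comparison instead of a slice comparison.
import Mathlib
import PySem

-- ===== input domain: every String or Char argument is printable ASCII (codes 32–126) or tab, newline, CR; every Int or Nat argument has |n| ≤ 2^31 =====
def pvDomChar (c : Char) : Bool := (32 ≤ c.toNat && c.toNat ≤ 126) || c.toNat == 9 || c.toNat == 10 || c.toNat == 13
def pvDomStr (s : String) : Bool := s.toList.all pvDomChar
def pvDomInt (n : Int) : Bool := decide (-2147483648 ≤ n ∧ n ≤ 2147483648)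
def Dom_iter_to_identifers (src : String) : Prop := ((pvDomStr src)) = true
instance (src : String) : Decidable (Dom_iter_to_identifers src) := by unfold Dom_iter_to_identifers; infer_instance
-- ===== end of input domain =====

-- B rewrites A's flat single-loop state machine (strch flag) as an outer loop over
-- searchable text with a dedicated inner loop consuming one string literal; same output.

-- ===== PORT A =====
-- literal port of A's single while-loop with state (start, i, strch);
-- fuel is only a totality guard: each Python iteration advances i, so length+1 fuel never runs out
def pvALoop (cs : List Char) (start i : Nat) (strch : Option Char) : Nat → List (Bool × Int × Int)
  | 0 => []
  | fuel + 1 =>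
    if cs.length ≤ i then [(true, (start : Int), (cs.length : Int))]
    else
      let ch := cs.getD i ' '
      if PySem.Chars.isspace ch then pvALoop cs start (i+1) strch fuel
      else
        match strch with
        | none =>
          if ch = '\'' ∨ ch = '"' then
            (true, (start : Int), (i : Int)) :: pvALoop cs i (i+1) (some ch) fuel
          else if ch = '#' then
            (if PySem.List.slice cs (some (start : Int)) (some (i : Int)) ≠ ([] : List Char)
              then [(true, (start : Int), (i : Int))] else [])
            ++ [(false, (i : Int), (cs.length : Int))]
          else pvALoop cs start (i+1) none fuel
        | some q =>
          if ch = '\\' then pvALoop cs start (i+2) strch fuel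
          else if ch = q then
            (false, (start : Int), (i : Int) + 1) :: pvALoop cs (i+1) (i+1) none fuel
          else pvALoop cs start (i+1) strch fuel

def iter_to_identifers (src : String) : List (Bool × Int × Int) :=
  pvALoop src.toList 0 0 none (src.toList.length + 1)

-- ===== PORT B =====
-- B's inner loop: scan from j for the quote q, skipping backslash escapes;
-- some j = position of the closing quote, none = unterminated (fuel = totality guard)
def pvBInner (cs : List Char) (q : Char) (j : Nat) : Nat → Option Nat
  | 0 => none
  | fuel + 1 =>
    if cs.length ≤ j then none
    else
      let c := cs.getD j ' '
      if c = '\\' then pvBInner cs q (j+2) fuel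
      else if c = q then some j
      else pvBInner cs q (j+1) fuel

-- B's outer loop over searchable text
def pvBOuter (cs : List Char) (start i : Nat) : Nat → List (Bool × Int × Int)
  | 0 => []
  | fuel + 1 =>
    if cs.length ≤ i then [(true, (start : Int), (cs.length : Int))]
    else
      let ch := cs.getD i ' '
      if ch = '\'' ∨ ch = '"' then
        (true, (start : Int), (i : Int)) ::
        (match pvBInner cs ch (i+1) (cs.length + 1) with
          | some j => (false, (i : Int), (j : Int) + 1) :: pvBOuter cs (j+1) (j+1) fuel
          | none => [(true, (i : Int), (cs.length : Int))])
      else if ch = '#' then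
        (if start ≠ i then [(true, (start : Int), (i : Int))] else [])
        ++ [(false, (i : Int), (cs.length : Int))]
      else pvBOuter cs start (i+1) fuel

def iter_to_identifers_alt (src : String) : List (Bool × Int × Int) :=
  pvBOuter src.toList 0 0 (src.toList.length + 1)

-- ===== PRECONDITION & SPEC =====
def Spec_iter_to_identifers (src : String) (out : List (Bool × Int × Int)) : Prop := out = iter_to_identifers_alt src
instance (src : String) (out : List (Bool × Int × Int)) : Decidable (Spec_iter_to_identifers src out) := by unfold Spec_iter_to_identifers; infer_instance

-- ===== CLAIM (what is proved, stated in full; the proofs are below) =====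
def Claim_equal_iter_to_identifers : Prop := ∀ (src : String), Dom_iter_to_identifers src → Spec_iter_to_identifers src (iter_to_identifers src)

-- ===== LEMMAS AND PROOFS =====

-- with sufficient fuel, the inner scan does not depend on the fuel
theorem pvBInner_fuel (cs : List Char) (q : Char) :
    ∀ f f' j, cs.length - j < f → cs.length - j < f' →
    pvBInner cs q j f = pvBInner cs q j f' := by
  intro f
  induction f with
  | zero => intro f' j hf _; omega
  | succ f ih =>
    intro f' j hf hf'
    cases f' with
    | zero => omega
    | succ f' =>
      simp only [pvBInner]
      by_cases hlen : cs.length ≤ j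
      · rw [if_pos hlen, if_pos hlen]
      · rw [if_neg hlen, if_neg hlen]
        split_ifs
        · exact ih f' (j+2) (by omega) (by omega)
        · rfl
        · exact ih f' (j+1) (by omega) (by omega)

-- the inner scan never moves backwards
theorem pvBInner_le (cs : List Char) (q : Char) :
    ∀ f j0 j, pvBInner cs q j0 f = some j → j0 ≤ j := by
  intro f
  induction f with
  | zero => intro j0 j h; exact absurd h (by simp [pvBInner])
  | succ f ih =>
    intro j0 j h
    simp only [pvBInner] at h
    by_cases hlen : cs.length ≤ j0
    · rw [if_pos hlen] at h; exact absurd h (by simp)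
    · rw [if_neg hlen] at h
      split_ifs at h
      · have := ih (j0+2) j h; omega
      · simp only [Option.some.injEq] at h; omega
      · have := ih (j0+1) j h; omega

-- with sufficient fuel, A's loop does not depend on the fuel
theorem pvALoop_fuel (cs : List Char) :
    ∀ f f' i start strch, cs.length - i < f → cs.length - i < f' →
    pvALoop cs start i strch f = pvALoop cs start i strch f' := by
  intro f
  induction f with
  | zero => intro f' i start strch hf _; omega
  | succ f ih =>
    intro f' i start strch hf hf'
    cases f' with
    | zero => omega
    | succ f' =>
      cases strch with
      | none =>
        simp only [pvALoop]
        by_cases hlen : cs.length ≤ i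
        · rw [if_pos hlen, if_pos hlen]
        · rw [if_neg hlen, if_neg hlen]
          by_cases hsp : PySem.Chars.isspace (cs.getD i ' ') = true
          · rw [if_pos hsp, if_pos hsp]
            exact ih f' (i+1) start none (by omega) (by omega)
          · rw [if_neg hsp, if_neg hsp]
            by_cases h1 : cs.getD i ' ' = '\'' ∨ cs.getD i ' ' = '"'
            · rw [if_pos h1, if_pos h1,
                  ih f' (i+1) i (some (cs.getD i ' ')) (by omega) (by omega)]
            · rw [if_neg h1, if_neg h1]
              by_cases h2 : cs.getD i ' ' = '#'
              · rw [if_pos h2, if_pos h2]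
              · rw [if_neg h2, if_neg h2]
                exact ih f' (i+1) start none (by omega) (by omega)
      | some q =>
        simp only [pvALoop]
        by_cases hlen : cs.length ≤ i
        · rw [if_pos hlen, if_pos hlen]
        · rw [if_neg hlen, if_neg hlen]
          by_cases hsp : PySem.Chars.isspace (cs.getD i ' ') = true
          · rw [if_pos hsp, if_pos hsp]
            exact ih f' (i+1) start (some q) (by omega) (by omega)
          · rw [if_neg hsp, if_neg hsp]
            by_cases h1 : cs.getD i ' ' = '\\'
            · rw [if_pos h1, if_pos h1]
              exact ih f' (i+2) start (some q) (by omega) (by omega)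
            · rw [if_neg h1, if_neg h1]
              by_cases h2 : cs.getD i ' ' = q
              · rw [if_pos h2, if_pos h2,
                    ih f' (i+1) (i+1) none (by omega) (by omega)]
              · rw [if_neg h2, if_neg h2]
                exact ih f' (i+1) start (some q) (by omega) (by omega)

-- A in string mode (strch = some q) behaves like B's inner scan followed by the close/unterminated yields
theorem pvA_string (cs : List Char) (q : Char) (hq : PySem.Chars.isspace q = false) :
    ∀ f i start, cs.length - i < f →
    pvALoop cs start i (some q) f =
      match pvBInner cs q i f with
      | some j => (false, (start : Int), (j : Int) + 1) :: pvALoop cs (j+1) (j+1) none f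
      | none => [(true, (start : Int), (cs.length : Int))] := by
  intro f
  induction f with
  | zero => intro i start hf; omega
  | succ f ih =>
    intro i start hf
    by_cases hlen : cs.length ≤ i
    · simp only [pvALoop, pvBInner]
      rw [if_pos hlen, if_pos hlen]
    · conv_lhs => rw [pvALoop]
      conv_rhs => rw [pvBInner]
      rw [if_neg hlen, if_neg hlen]
      simp only
      by_cases hsp : PySem.Chars.isspace (cs.getD i ' ') = true
      · have h1 : ¬ (cs.getD i ' ' = '\\') := by
          intro e; rw [e] at hsp; exact absurd hsp (by decide)
        have h2 : ¬ (cs.getD i ' ' = q) := by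
          intro e; rw [e] at hsp; rw [hq] at hsp; exact absurd hsp (by simp)
        rw [if_pos hsp, if_neg h1, if_neg h2]
        rw [ih (i+1) start (by omega)]
        cases hj : pvBInner cs q (i+1) f with
        | none => simp
        | some j =>
          have hji := pvBInner_le cs q f (i+1) j hj
          simp only
          rw [pvALoop_fuel cs f (f+1) (j+1) (j+1) none (by omega) (by omega)]
      · rw [if_neg hsp]
        by_cases h1 : cs.getD i ' ' = '\\'
        · rw [if_pos h1, if_pos h1]
          rw [ih (i+2) start (by omega)]
          rw [pvBInner_fuel cs q f (f+1) (i+2) (by omega) (by omega)]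
          cases hj : pvBInner cs q (i+2) (f+1) with
          | none => simp
          | some j =>
            have hji := pvBInner_le cs q (f+1) (i+2) j hj
            simp only
            rw [pvALoop_fuel cs f (f+1) (j+1) (j+1) none (by omega) (by omega)]
        · rw [if_neg h1, if_neg h1]
          by_cases h2 : cs.getD i ' ' = q
          · rw [if_pos h2, if_pos h2]
            simp only
            rw [pvALoop_fuel cs f (f+1) (i+1) (i+1) none (by omega) (by omega)]
          · rw [if_neg h2, if_neg h2]
            rw [ih (i+1) start (by omega)]
            rw [pvBInner_fuel cs q f (f+1) (i+1) (by omega) (by omega)]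
            cases hj : pvBInner cs q (i+1) (f+1) with
            | none => simp
            | some j =>
              have hji := pvBInner_le cs q (f+1) (i+1) j hj
              simp only
              rw [pvALoop_fuel cs f (f+1) (j+1) (j+1) none (by omega) (by omega)]

-- A in searchable mode equals B's outer loop (invariant: start ≤ i)
theorem pv_main (cs : List Char) :
    ∀ f i start, cs.length - i < f → start ≤ i →
    pvALoop cs start i none f = pvBOuter cs start i f := by
  intro f
  induction f with
  | zero => intro i start hf _; omega
  | succ f ih =>
    intro i start hf hsi
    by_cases hlen : cs.length ≤ i
    · simp only [pvALoop, pvBOuter]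
      rw [if_pos hlen, if_pos hlen]
    · conv_lhs => rw [pvALoop]
      conv_rhs => rw [pvBOuter]
      rw [if_neg hlen, if_neg hlen]
      simp only
      by_cases hsp : PySem.Chars.isspace (cs.getD i ' ') = true
      · have h1 : ¬ (cs.getD i ' ' = '\'' ∨ cs.getD i ' ' = '"') := by
          rintro (e | e) <;> rw [e] at hsp <;> exact absurd hsp (by decide)
        have h2 : ¬ (cs.getD i ' ' = '#') := by
          intro e; rw [e] at hsp; exact absurd hsp (by decide)
        rw [if_pos hsp, if_neg h1, if_neg h2]
        exact ih (i+1) start (by omega) (by omega)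
      · rw [if_neg hsp]
        by_cases hq : cs.getD i ' ' = '\'' ∨ cs.getD i ' ' = '"'
        · rw [if_pos hq, if_pos hq]
          have hqs : PySem.Chars.isspace (cs.getD i ' ') = false := by
            simpa using hsp
          rw [pvA_string cs (cs.getD i ' ') hqs f (i+1) i (by omega)]
          rw [pvBInner_fuel cs (cs.getD i ' ') f (cs.length + 1) (i+1) (by omega) (by omega)]
          congr 1
          cases hj : pvBInner cs (cs.getD i ' ') (i+1) (cs.length + 1) with
          | none => simp
          | some j =>
            have hji := pvBInner_le cs (cs.getD i ' ') (cs.length + 1) (i+1) j hj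
            simp only
            congr 1
            exact ih (j+1) (j+1) (by omega) (by omega)
        · rw [if_neg hq, if_neg hq]
          by_cases hh : cs.getD i ' ' = '#'
          · rw [if_pos hh, if_pos hh]
            have hslice : PySem.List.slice cs (some (start : Int)) (some (i : Int))
                = (cs.drop start).take (i - start) := PySem.List.slice_natCast cs start i
            by_cases hsi' : start = i
            · rw [if_neg (by simp only [ne_eq, not_not]; rw [hslice, hsi']; simp),
                  if_neg (by omega)]
            · have hne : PySem.List.slice cs (some (start : Int)) (some (i : Int)) ≠ ([] : List Char) := by
                rw [hslice]
                simp only [ne_eq, List.take_eq_nil_iff, List.drop_eq_nil_iff]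
                omega
              rw [if_pos hne, if_pos hsi']
          · rw [if_neg hh, if_neg hh]
            exact ih (i+1) start (by omega) (by omega)

-- ===== VERDICT (by name: the statement is the Claim_ definition above) =====
theorem iter_to_identifers_spec : Claim_equal_iter_to_identifers := by
  intro src _
  unfold Spec_iter_to_identifers iter_to_identifers iter_to_identifers_alt
  exact pv_main src.toList (src.toList.length + 1) 0 0 (by omega) (by omega)
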